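-- pv_equiv track=rewrite | github.com/daveschaaf/AdventOfCode | 2024/code02.py | part1
-- ===== SOURCE A (Python) =====
-- def part1(data):
--     """
--     Determines the number of safe reports in an array of reports
--
--     A report is safe based on 2 rules:
--         Rule 1: Reports are strictly monotonic (all increasing or all decreasing)
--         Rule 2: Any two adjacent levels differ by at least one and at most three.
--
--     Args:
--         data: a list of lists with a series of integers
--
--     Returns:
--         int: the number of safe reports in the original data
--         list: a list of the reports that are determined to be unsafe
--     """
--
--     safe: int = 0
--
--     unsafe_reports: [list] = []
--
--     for raw_report in data:
--
--         # Normalize the monotonicity by determining which direction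
--         # the series should be (in/de)creasing
--         if raw_report[-1] - raw_report[0] > 0:
--             direction = 1
--         else:
--             direction = -1
--
--         # Find the difference between 2 consecutive elements and normalize it
--         # by multiplying by out expected direction
--         deltas = [direction * (raw_report[i] - raw_report[i - 1]) for i in range(1,len(raw_report))]
--
--         # Check that all differences between 2 consecutive values are in 1-3
--         rules = all([n >= 1 and n<= 3 for n in deltas])
--
--         if rules:
--             safe += 1
--         else:
--             unsafe_reports.append(raw_report)
--
--     return safe, unsafe_reports
-- ===== SOURCE B (Python) =====
-- def _is_safe(report):
--     diffs = [b - a for a, b in zip(report, report[1:])]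
--     return all(1 <= d <= 3 for d in diffs) or all(-3 <= d <= -1 for d in diffs)
--
--
-- def part1(data):
--     unsafe_reports = [report for report in data if not _is_safe(report)]
--     return len(data) - len(unsafe_reports), unsafe_reports
-- ===== Notes on version B (the rewrite author's own statement) =====
-- stated objective: simpler
-- what changed: B replaces the endpoint-based direction normalization, index-built delta list and running counter with a helper that checks the raw adjacent-difference list against both monotone ranges, a filter of the unsafe reports, and the safe count obtained by subtraction.
import Mathlib
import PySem

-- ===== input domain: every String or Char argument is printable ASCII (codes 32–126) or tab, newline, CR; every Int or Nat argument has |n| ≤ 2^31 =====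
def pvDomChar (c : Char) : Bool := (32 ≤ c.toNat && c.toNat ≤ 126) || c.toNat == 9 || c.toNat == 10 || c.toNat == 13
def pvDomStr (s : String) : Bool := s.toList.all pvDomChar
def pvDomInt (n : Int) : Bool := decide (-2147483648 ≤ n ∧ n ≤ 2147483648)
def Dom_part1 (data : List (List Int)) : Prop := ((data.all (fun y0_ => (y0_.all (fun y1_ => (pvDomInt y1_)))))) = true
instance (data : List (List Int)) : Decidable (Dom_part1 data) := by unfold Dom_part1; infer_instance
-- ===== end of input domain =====

-- ===== PORT A =====
-- one loop iteration of A: normalize the direction from the endpoints, build the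
-- normalized delta list by indexing, then update (safe, notSafeReports)
def part1StepA (st : Int × List (List Int)) (rawReport : List Int) : Int × List (List Int) :=
  let direction : Int :=
    if PySem.List.pyGetD rawReport (-1) 0 - PySem.List.pyGetD rawReport 0 0 > 0 then 1 else -1
  let deltas : List Int :=
    (PySem.List.pyRange 1 rawReport.length 1).map
      (fun i => direction * (PySem.List.pyGetD rawReport i 0 - PySem.List.pyGetD rawReport (i - 1) 0))
  let rules : Bool := deltas.all (fun n => decide (n ≥ 1 ∧ n ≤ 3))
  if rules then (st.1 + 1, st.2) else (st.1, st.2 ++ [rawReport])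

def part1 (data : List (List Int)) : Int × List (List Int) :=
  data.foldl part1StepA (0, [])

-- ===== PORT B =====
-- zip(report, report[1:]) pairs each element with its successor, so the
-- comprehension [b - a for a, b in zip(report, report[1:])] is this zipWith
def isSafeB (report : List Int) : Bool :=
  let diffs : List Int := List.zipWith (fun a b => b - a) report report.tail
  diffs.all (fun d => decide (1 ≤ d ∧ d ≤ 3)) || diffs.all (fun d => decide (-3 ≤ d ∧ d ≤ -1))

def part1_alt (data : List (List Int)) : Int × List (List Int) :=
  let notSafeReports := data.filter (fun report => ! isSafeB report)
  ((data.length : Int) - (notSafeReports.length : Int), notSafeReports)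

-- ===== PRECONDITION & SPEC =====
-- Pre_ excludes data containing an empty report: there A raises IndexError at report[-1]
-- (B returns normally on such data, treating the vacuous report as safe).
def Pre_part1 (data : List (List Int)) : Prop := ∀ r ∈ data, r ≠ []
instance (data : List (List Int)) : Decidable (Pre_part1 data) := by unfold Pre_part1; infer_instance
def pvWitness_part1 : List (List Int) := [[1, 2, 4], [5, 3, 2], [1, 5, 2]]

def Spec_part1 (data : List (List Int)) (out : Int × List (List Int)) : Prop := out = part1_alt data
instance (data : List (List Int)) (out : Int × List (List Int)) : Decidable (Spec_part1 data out) := by unfold Spec_part1; infer_instance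

-- ===== CLAIM (what is proved, stated in full; the proofs are below) =====
def Claim_equal_part1 : Prop := ∀ (data : List (List Int)), Dom_part1 data → Pre_part1 data → Spec_part1 data (part1 data)

-- ===== LEMMAS AND PROOFS =====

-- the adjacent-difference list of a nonempty report
theorem diffs_cons (a : Int) (t : List Int) :
    List.zipWith (fun x y => y - x) (a :: t) t =
      match t with
      | [] => []
      | b :: t' => (b - a) :: List.zipWith (fun x y => y - x) (b :: t') t' := by
  cases t <;> rfl

-- A's index-built delta list is the diff list scaled by the direction
theorem deltasA_eq (r : List Int) (dir : Int) :
    (PySem.List.pyRange 1 r.length 1).map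
      (fun i => dir * (PySem.List.pyGetD r i 0 - PySem.List.pyGetD r (i - 1) 0)) =
    (List.zipWith (fun a b => b - a) r r.tail).map (fun d => dir * d) := by
  apply List.ext_getElem
  · simp [PySem.List.length_pyRange_one]
  · intro k h1 h2
    have hk : k < r.length - 1 := by
      simpa [PySem.List.length_pyRange_one] using h1
    have hidx : (PySem.List.pyRange 1 (r.length : Int) 1)[k]'(by simpa [PySem.List.length_pyRange_one] using h1) = 1 + (k : Int) :=
      PySem.List.getElem_pyRange_one ..
    simp only [List.getElem_map, hidx]
    have h1k : PySem.List.pyGetD r (1 + (k : Int)) 0 = r[k + 1]'(by omega) := by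
      have := PySem.List.pyGetD_eq_getElem (xs := r) (i := 1 + (k : Int)) (d := 0)
        (by omega) (by omega)
      rw [this]
      congr 1
      omega
    have h0k : PySem.List.pyGetD r (1 + (k : Int) - 1) 0 = r[k]'(by omega) := by
      have := PySem.List.pyGetD_eq_getElem (xs := r) (i := 1 + (k : Int) - 1) (d := 0)
        (by omega) (by omega)
      rw [this]
      congr 1
      omega
    rw [h1k, h0k]
    have hz : (List.zipWith (fun a b => b - a) r r.tail)[k]'(by simp; omega) =
        r.tail[k]'(by simp [List.length_tail]; omega) - r[k]'(by omega) := by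
      simp
    simp only [hz, List.getElem_tail]

-- all diffs ≥ 1 forces head ≤ last (strict when there are at least two levels)
theorem head_le_last_of_up (a : Int) (t : List Int)
    (h : ∀ d ∈ List.zipWith (fun x y => y - x) (a :: t) t, 1 ≤ d) :
    a ≤ (a :: t).getLast (by simp) ∧ (t ≠ [] → a < (a :: t).getLast (by simp)) := by
  induction t generalizing a with
  | nil => simp
  | cons b t' ih =>
    have hmem : (1 : Int) ≤ b - a := h _ (by rw [diffs_cons]; exact List.mem_cons_self ..)
    have ih' := ih b (fun d hd => h d (by rw [diffs_cons]; exact List.mem_cons_of_mem _ hd))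
    have hlast : (a :: b :: t').getLast (by simp) = (b :: t').getLast (by simp) :=
      List.getLast_cons (by simp)
    constructor
    · rw [hlast]; omega
    · intro _; rw [hlast]; omega

-- all diffs ≤ -1 forces last ≤ head (strict when there are at least two levels)
theorem last_le_head_of_down (a : Int) (t : List Int)
    (h : ∀ d ∈ List.zipWith (fun x y => y - x) (a :: t) t, d ≤ -1) :
    (a :: t).getLast (by simp) ≤ a ∧ (t ≠ [] → (a :: t).getLast (by simp) < a) := by
  induction t generalizing a with
  | nil => simp
  | cons b t' ih =>
    have hmem : b - a ≤ (-1 : Int) := h _ (by rw [diffs_cons]; exact List.mem_cons_self ..)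
    have ih' := ih b (fun d hd => h d (by rw [diffs_cons]; exact List.mem_cons_of_mem _ hd))
    have hlast : (a :: b :: t').getLast (by simp) = (b :: t').getLast (by simp) :=
      List.getLast_cons (by simp)
    constructor
    · rw [hlast]; omega
    · intro _; rw [hlast]; omega

-- core: A's per-report rule check equals B's helper on a nonempty report
theorem rules_eq (r : List Int) (hr : r ≠ []) :
    (let direction : Int :=
       if PySem.List.pyGetD r (-1) 0 - PySem.List.pyGetD r 0 0 > 0 then 1 else -1
     ((PySem.List.pyRange 1 r.length 1).map
       (fun i => direction * (PySem.List.pyGetD r i 0 - PySem.List.pyGetD r (i - 1) 0))).all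
         (fun n => decide (n ≥ 1 ∧ n ≤ 3))) = isSafeB r := by
  obtain ⟨a, t, rfl⟩ := List.exists_cons_of_ne_nil hr
  simp only [isSafeB]
  rw [deltasA_eq]
  rw [PySem.List.pyGetD_neg_one (xs := a :: t) (h := by simp), PySem.List.pyGetD_zero_cons]
  set L := (a :: t).getLast (by simp) with hL
  set D := List.zipWith (fun x y => y - x) (a :: t) (a :: t).tail with hD
  have hDt : D = List.zipWith (fun x y => y - x) (a :: t) t := by simp [hD]
  by_cases hdir : L - a > 0
  · simp only [hdir, if_pos]
    rw [Bool.eq_iff_iff]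
    simp only [List.all_map, List.all_eq_true, Bool.or_eq_true, decide_eq_true_eq, Function.comp, one_mul, ge_iff_le]
    constructor
    · intro hall; exact Or.inl hall
    · rintro (hall | hall)
      · exact hall
      · -- all diffs ≤ -1 with head < last: only possible when there are no diffs
        cases t with
        | nil => intro d hd; simp [hD] at hd
        | cons b t' =>
          exfalso
          have := last_le_head_of_down a (b :: t')
            (fun d hd => (hall d (by rwa [hDt])).2) |>.2 (by simp)
          omega
  · simp only [hdir, if_neg, not_false_eq_true]
    rw [Bool.eq_iff_iff]
    simp only [List.all_map, List.all_eq_true, Bool.or_eq_true, decide_eq_true_eq, Function.comp, ge_iff_le]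
    constructor
    · intro hall
      refine Or.inr (fun d hd => ?_)
      have := hall d hd
      omega
    · rintro (hall | hall)
      · -- all diffs ≥ 1 with ¬(head < last): only possible when there are no diffs
        cases t with
        | nil => intro d hd; simp [hD] at hd
        | cons b t' =>
          exfalso
          have := head_le_last_of_up a (b :: t')
            (fun d hd => (hall d (by rwa [hDt])).1) |>.2 (by simp)
          omega
      · intro d hd
        have := hall d hd
        omega

-- A's per-report branch condition, phrased through B's helper
theorem stepA_eq (st : Int × List (List Int)) (r : List Int) (hr : r ≠ []) :
    part1StepA st r = if isSafeB r then (st.1 + 1, st.2) else (st.1, st.2 ++ [r]) := by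
  simp only [part1StepA]
  rw [rules_eq r hr]

-- loop invariant for A's fold, in terms of B's filter and a running count
theorem foldA_eq (l : List (List Int)) (hl : ∀ r ∈ l, r ≠ []) :
    ∀ (s : Int) (u : List (List Int)),
      l.foldl part1StepA (s, u) =
        (s + ((l.countP isSafeB : Nat) : Int), u ++ l.filter (fun r => ! isSafeB r)) := by
  induction l with
  | nil => intro s u; simp
  | cons r l' ih =>
    intro s u
    have hr : r ≠ [] := hl r (List.mem_cons_self ..)
    have ih' := ih (fun x hx => hl x (List.mem_cons_of_mem _ hx))
    simp only [List.foldl_cons, stepA_eq (s, u) r hr]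
    by_cases hs : isSafeB r
    · rw [if_pos hs, ih']
      simp [hs]
      ring
    · rw [if_neg hs, ih']
      simp [hs]

-- countP of the safe predicate is the length minus the unsafe count
theorem countP_eq_sub (l : List (List Int)) :
    ((l.countP isSafeB : Nat) : Int) =
      (l.length : Int) - ((l.filter (fun r => ! isSafeB r)).length : Int) := by
  induction l with
  | nil => simp
  | cons r l' ih =>
    by_cases hs : isSafeB r <;>
      simp [hs] <;> omega

-- ===== VERDICT (by name: the statement is the Claim_ definition above) =====
theorem part1_spec : Claim_equal_part1 := by
  intro data _ hpre
  show part1 data = part1_alt data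
  simp only [part1, part1_alt]
  rw [foldA_eq data hpre 0 []]
  simp only [zero_add, List.nil_append]
  rw [countP_eq_sub]
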